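-- pv_equiv track=rewrite | github.com/kamaleshkoiri321/srm_coding_round_template | q1.py | first_stable_character
-- ===== SOURCE A (Python) =====
-- def first_stable_character(s):
--     """
--     Find the first stable character in the string.
--
--     A character is stable if:
--     1. It appears at least twice
--     2. All occurrences are in one continuous group
--
--     Args:
--         s (str): Input string
--
--     Returns:
--         str or None: First stable character, or None if no stable character exists
--
--     Examples:
--         >>> first_stable_character("abccba")
--         'c'
--         >>> first_stable_character("abc")
--         None
--         >>> first_stable_character("a")
--         None
--     """
--     char_positions = {}
--     for i, char in enumerate(s):
--         if char not in char_positions: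
--             char_positions[char] = []
--         char_positions[char].append(i)
--
--
--     for i, char in enumerate(s):
--         if char not in char_positions:
--             continue
--         positions = char_positions[char]
--
--
--         if len(positions) < 2:
--             del char_positions[char]
--             continue
--
--         is_continuous = True
--         for j in range(len(positions) - 1):
--             if positions[j + 1] - positions[j] != 1:
--                 is_continuous = False
--                 break
--
--         if is_continuous:
--             return char
--
--         del char_positions[char]
--
--     return None
-- ===== SOURCE B (Python) =====
-- def first_stable_character(s):
--     for c in s:
--         k = s.count(c)
--         if k >= 2 and c * k in s:
--             return c
--     return None
-- ===== Notes on version B (the rewrite author's own statement) =====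
-- stated objective: simpler
-- what changed: Replaces A's positions dictionary with its three loops (build positions, scan with deletions, adjacent-difference contiguity check) by a single scan testing each character with s.count(c) >= 2 and c*s.count(c) in s (all occurrences contiguous iff a run of count(c) copies is a substring).
import Mathlib
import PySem

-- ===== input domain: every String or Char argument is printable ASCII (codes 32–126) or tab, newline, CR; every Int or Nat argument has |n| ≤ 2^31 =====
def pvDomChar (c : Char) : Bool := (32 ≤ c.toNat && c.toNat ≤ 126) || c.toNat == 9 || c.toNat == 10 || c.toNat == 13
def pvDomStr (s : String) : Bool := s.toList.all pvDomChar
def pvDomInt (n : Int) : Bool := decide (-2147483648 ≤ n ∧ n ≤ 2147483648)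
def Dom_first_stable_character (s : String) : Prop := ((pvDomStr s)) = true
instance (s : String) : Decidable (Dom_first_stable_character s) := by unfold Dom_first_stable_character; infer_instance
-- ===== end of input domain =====

-- B drops A's positions dictionary and its three index loops for a per-character test
-- "s.count(c) >= 2 and c * s.count(c) in s" (simpler; same return value on every input; A is total, so no Pre_).

-- ===== PORT A =====
-- the inner `for j in range(len(positions) - 1)` adjacent-difference check with early break
def pvIsCont : List Int → Bool
  | a :: b :: r => if b - a ≠ 1 then false else pvIsCont (b :: r)
  | _ => true

-- the second `for i, char in enumerate(s)` loop: skip if deleted, delete if len < 2,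
-- return on continuous, delete otherwise
def pvLoopA (d : PySem.Dict Char (List Int)) : List (Int × Char) → Option String
  | [] => none
  | (_, c) :: rest =>
    if d.contains c = false then pvLoopA d rest
    else
      let ps := d.getD c []
      if ps.length < 2 then pvLoopA (d.erase c) rest
      else if pvIsCont ps then some (String.ofList [c])
      else pvLoopA (d.erase c) rest

def first_stable_character (s : String) : Option String :=
  -- first loop: char_positions[char].append(i), creating the empty list on first sight
  let d := (PySem.List.enumerate s.toList).foldl
    (fun d p =>
      let d1 := if d.contains p.2 then d else d.insert p.2 ([] : List Int)
      d1.modify p.2 [] (fun ps => ps ++ [p.1]))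
    PySem.Dict.empty
  pvLoopA d (PySem.List.enumerate s.toList)

-- ===== PORT B =====
-- `for c in s: k = s.count(c); if k >= 2 and c * k in s: return c`
def pvLoopB (s : String) : List Char → Option String
  | [] => none
  | c :: rest =>
    let k := PySem.Str.count s (String.ofList [c])
    if 2 ≤ k ∧ PySem.Str.isIn (String.ofList (List.replicate k c)) s = true then some (String.ofList [c])
    else pvLoopB s rest

def first_stable_character_alt (s : String) : Option String := pvLoopB s s.toList

-- ===== PRECONDITION & SPEC =====
def Spec_first_stable_character (s : String) (out : Option String) : Prop := out = first_stable_character_alt s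
instance (s : String) (out : Option String) : Decidable (Spec_first_stable_character s out) := by unfold Spec_first_stable_character; infer_instance

-- ===== CLAIM (what is proved, stated in full; the proofs are below) =====
def Claim_equal_first_stable_character : Prop := ∀ (s : String), Dom_first_stable_character s → Spec_first_stable_character s (first_stable_character s)

-- ===== LEMMAS AND PROOFS =====

-- positions of c in l when enumeration starts at s0 (the value of A's char_positions[c])
def pvPos (c : Char) (l : List Char) (s0 : Int) : List Int :=
  ((PySem.List.enumerate l s0).filter (fun p => p.2 == c)).map (·.1)

-- A's per-character test
def pvPredA (l : List Char) (c : Char) : Bool :=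
  !(decide ((pvPos c l 0).length < 2)) && pvIsCont (pvPos c l 0)

-- B's per-character test
def pvPredB (l : List Char) (c : Char) : Bool :=
  decide (2 ≤ PySem.Chars.count l [c] ∧
    PySem.Chars.isIn (List.replicate (PySem.Chars.count l [c]) c) l = true)

-- all occurrences of c form one contiguous run, structurally
def pvBlock (c : Char) : List Char → Bool
  | [] => true
  | x :: t => if x = c then pvBlock c t else decide (c ∉ t)

def pvNoSplit (c : Char) : List Char → Bool
  | [] => true
  | x :: t => if x = c then pvBlock c t else pvNoSplit c t

-- A's build loop, named
def pvStep (d : PySem.Dict Char (List Int)) (p : Int × Char) : PySem.Dict Char (List Int) :=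
  (if d.contains p.2 then d else d.insert p.2 ([] : List Int)).modify p.2 [] (fun ps => ps ++ [p.1])

theorem pvPos_nil (c : Char) (s0 : Int) : pvPos c [] s0 = [] := by
  simp [pvPos, PySem.List.enumerate_nil]

theorem pvPos_cons (c x : Char) (t : List Char) (s0 : Int) :
    pvPos c (x :: t) s0 = if x = c then s0 :: pvPos c t (s0 + 1) else pvPos c t (s0 + 1) := by
  simp only [pvPos, PySem.List.enumerate_cons, List.filter_cons]
  split_ifs with h h2 h2 <;> simp_all

theorem pvPos_length (c : Char) (l : List Char) (s0 : Int) :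
    (pvPos c l s0).length = l.count c := by
  induction l generalizing s0 with
  | nil => simp [pvPos_nil]
  | cons x t ih => rw [pvPos_cons]; split_ifs with h <;> simp [h, List.count_cons, ih]

theorem pvPos_lb (c : Char) (l : List Char) (s0 : Int) :
    ∀ p ∈ pvPos c l s0, s0 ≤ p := by
  induction l generalizing s0 with
  | nil => simp [pvPos_nil]
  | cons x t ih =>
    intro p hp
    rw [pvPos_cons] at hp
    split_ifs at hp with h
    · rcases List.mem_cons.1 hp with rfl | hp
      · exact le_refl _
      · have := ih (s0 + 1) p hp; omega
    · have := ih (s0 + 1) p hp; omega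

theorem pvPos_eq_nil_iff (c : Char) (l : List Char) (s0 : Int) :
    pvPos c l s0 = [] ↔ c ∉ l := by
  induction l generalizing s0 with
  | nil => simp [pvPos_nil]
  | cons x t ih =>
    rw [pvPos_cons]
    split_ifs with h
    · simp [h]
    · simp [ih, h, Ne.symm h]

theorem pvIsCont_block (c : Char) (t : List Char) (s1 : Int) :
    pvIsCont (s1 :: pvPos c t (s1 + 1)) = pvBlock c t := by
  induction t generalizing s1 with
  | nil => simp [pvPos_nil, pvIsCont, pvBlock]
  | cons x t2 ih =>
    rw [pvPos_cons]
    by_cases h : x = c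
    · rw [if_pos h, show pvBlock c (x :: t2) = pvBlock c t2 by simp [pvBlock, h]]
      have heq : pvIsCont (s1 :: (s1 + 1) :: pvPos c t2 (s1 + 1 + 1)) =
          pvIsCont ((s1 + 1) :: pvPos c t2 (s1 + 1 + 1)) := by
        simp [pvIsCont]
      rw [heq, ih]
    · rw [if_neg h, show pvBlock c (x :: t2) = decide (c ∉ t2) by simp [pvBlock, h]]
      by_cases hm : c ∈ t2
      · have hne : pvPos c t2 (s1 + 1 + 1) ≠ [] := by
          intro hn; exact ((pvPos_eq_nil_iff c t2 _).1 hn) hm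
        obtain ⟨b, r, hbr⟩ := List.exists_cons_of_ne_nil hne
        have hb : s1 + 1 + 1 ≤ b := pvPos_lb c t2 _ b (by rw [hbr]; exact List.mem_cons_self)
        rw [hbr]
        have : pvIsCont (s1 :: b :: r) = false := by
          simp only [pvIsCont]; rw [if_pos (by omega)]
        rw [this]
        simp [hm]
      · rw [(pvPos_eq_nil_iff c t2 _).2 hm]
        simp [pvIsCont, hm]

theorem pvIsCont_noSplit (c : Char) (l : List Char) (s0 : Int) :
    pvIsCont (pvPos c l s0) = pvNoSplit c l := by
  induction l generalizing s0 with
  | nil => simp [pvPos_nil, pvIsCont, pvNoSplit]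
  | cons x t ih =>
    rw [pvPos_cons]
    by_cases h : x = c
    · simp only [if_pos h, pvNoSplit, if_pos h]
      exact pvIsCont_block c t s0
    · simp only [if_neg h, pvNoSplit, if_neg h]
      exact ih (s0 + 1)

theorem pvBlock_iff (c : Char) (t : List Char) :
    pvBlock c t = true ↔ List.replicate (t.count c) c <+: t := by
  induction t with
  | nil => simp [pvBlock]
  | cons x t2 ih =>
    by_cases h : x = c
    · subst h
      rw [show pvBlock x (x :: t2) = pvBlock x t2 by simp [pvBlock]]
      rw [List.count_cons_self, List.replicate_succ, List.cons_prefix_cons]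
      simp [ih]
    · rw [show pvBlock c (x :: t2) = decide (c ∉ t2) by simp [pvBlock, h]]
      rw [List.count_cons_of_ne (a := c) (b := x) h]
      constructor
      · intro hnm
        have : t2.count c = 0 := List.count_eq_zero.2 (by simpa using hnm)
        simp [this]
      · intro hp
        by_cases hc : t2.count c = 0
        · simpa using List.count_eq_zero.1 hc
        · exfalso
          have h1 : 1 ≤ t2.count c := Nat.one_le_iff_ne_zero.2 hc
          rw [show t2.count c = (t2.count c - 1) + 1 by omega, List.replicate_succ,
            List.cons_prefix_cons] at hp
          exact h hp.1.symm

theorem pvNoSplit_iff (c : Char) (l : List Char) :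
    pvNoSplit c l = true ↔ List.replicate (l.count c) c <:+: l := by
  induction l with
  | nil => simp [pvNoSplit]
  | cons x t ih =>
    by_cases h : x = c
    · subst h
      rw [show pvNoSplit x (x :: t) = pvBlock x t by simp [pvNoSplit]]
      rw [pvBlock_iff, List.count_cons_self, List.replicate_succ]
      constructor
      · intro hp
        exact (List.cons_prefix_cons.2 ⟨rfl, hp⟩).isInfix
      · intro hinf
        obtain ⟨pre, suf, hE⟩ := hinf
        have hcnt : pre.count x = 0 := by
          have := congrArg (List.count x) hE
          simp [List.count_append, List.count_replicate_self] at this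
          omega
        match pre, hcnt with
        | [], _ =>
          simp only [List.nil_append, List.cons_append, List.cons.injEq] at hE
          exact ⟨suf, hE.2⟩
        | p0 :: pre', hcnt =>
          exfalso
          have hp0 : p0 = x := by
            have := congrArg (fun l => l.head?) hE
            simpa using this
          rw [hp0] at hcnt
          simp [List.count_cons_self] at hcnt
    · rw [show pvNoSplit c (x :: t) = pvNoSplit c t by simp [pvNoSplit, h]]
      rw [ih, List.count_cons_of_ne h]
      constructor
      · intro hinf; exact hinf.trans (List.suffix_cons x t).isInfix
      · intro hinf
        rcases List.infix_cons_iff.1 hinf with hp | hinf2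
        · by_cases hc : t.count c = 0
          · simp [hc]
          · exfalso
            rw [show t.count c = (t.count c - 1) + 1 by omega, List.replicate_succ,
              List.cons_prefix_cons] at hp
            exact h hp.1.symm
        · exact hinf2

theorem pvCountGo (c : Char) (l : List Char) : ∀ (fuel : Nat) (acc : Nat), l.length ≤ fuel →
    PySem.Chars.count.go [c] fuel l acc = acc + l.count c := by
  induction l with
  | nil => intro fuel acc _; cases fuel <;> simp [PySem.Chars.count.go]
  | cons x t ih =>
    intro fuel acc hf
    match fuel with
    | 0 => simp at hf
    | fuel + 1 =>
      rw [PySem.Chars.count.go]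
      by_cases h : x = c
      · subst h
        rw [if_pos (by simp [List.isPrefixOf])]
        simp only [List.length_singleton, List.drop_one, List.tail_cons]
        rw [ih fuel (acc + 1) (by simpa using hf)]
        simp [List.count_cons_self]
        omega
      · rw [if_neg (by simp [List.isPrefixOf, h]; intro hh; exact h hh.symm)]
        rw [ih fuel acc (by simpa using hf)]
        rw [List.count_cons_of_ne h]

theorem pvCount_singleton (c : Char) (l : List Char) :
    PySem.Chars.count l [c] = l.count c := by
  rw [PySem.Chars.count]
  rw [pvCountGo c l l.length 0 le_rfl]
  simp

theorem pvContains_erase {ν : Type} (d : PySem.Dict Char ν) (k k' : Char) :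
    (d.erase k).contains k' = if k' = k then false else d.contains k' := by
  rw [PySem.Dict.erase, PySem.Dict.contains, PySem.Dict.contains]
  induction d.items with
  | nil => simp
  | cons p t ih =>
    by_cases hpk : p.1 = k <;> by_cases hkk : k' = k <;>
      simp_all [List.any_cons] <;> (intro he; exact absurd he.symm hkk)

theorem pvGetD_erase {ν : Type} (d : PySem.Dict Char ν) (k k' : Char) (d0 : ν) :
    (d.erase k).getD k' d0 = if k' = k then d0 else d.getD k' d0 := by
  rw [PySem.Dict.getD, PySem.Dict.getD, PySem.Dict.get?, PySem.Dict.get?, PySem.Dict.erase]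
  induction d.items with
  | nil => simp
  | cons p t ih =>
    by_cases hpk : p.1 = k <;> by_cases hkk : k' = k <;> by_cases hpk' : p.1 = k' <;>
      simp_all [List.filter_cons, List.find?_cons]
theorem pvStep_getD (d : PySem.Dict Char (List Int)) (p : Int × Char) (c : Char) :
    (pvStep d p).getD c [] = if p.2 = c then d.getD c [] ++ [p.1] else d.getD c [] := by
  rw [pvStep, PySem.Dict.getD_modify]
  split_ifs with h1 h2 h3 h4 h5 h6 <;>
    simp_all [PySem.Dict.getD_insert, PySem.Dict.getD_of_not_contains]

theorem pvStep_contains (d : PySem.Dict Char (List Int)) (p : Int × Char) (c : Char) :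
    (pvStep d p).contains c = (c == p.2 || d.contains c) := by
  rw [pvStep]
  by_cases hc : d.contains p.2
  · rw [if_pos hc, PySem.Dict.contains_modify]
  · rw [if_neg hc, PySem.Dict.contains_modify, PySem.Dict.contains_insert]
    cases hb : (c == p.2) <;> simp [hb]

theorem pvFold_getD (pairs : List (Int × Char)) (d : PySem.Dict Char (List Int)) (c : Char) :
    (pairs.foldl pvStep d).getD c [] = d.getD c [] ++ (pairs.filter (fun p => p.2 == c)).map (·.1) := by
  induction pairs generalizing d with
  | nil => simp
  | cons p rest ih =>
    rw [List.foldl_cons, ih, pvStep_getD, List.filter_cons]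
    by_cases h : p.2 = c <;> simp [h]

theorem pvFold_contains (pairs : List (Int × Char)) (d : PySem.Dict Char (List Int)) (c : Char) :
    (pairs.foldl pvStep d).contains c = (d.contains c || pairs.any (fun p => p.2 == c)) := by
  induction pairs generalizing d with
  | nil => cases hd : d.contains c <;> simp [hd]
  | cons p rest ih =>
    rw [List.foldl_cons, ih, pvStep_contains, List.any_cons]
    cases hb : (c == p.2) <;> cases hb2 : (p.2 == c) <;> simp_all [Bool.or_assoc]
theorem pvLoopB_eq (s : String) (cs : List Char) :
    pvLoopB s cs = (cs.find? (pvPredB s.toList)).map (fun c => String.ofList [c]) := by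
  induction cs with
  | nil => simp [pvLoopB]
  | cons c rest ih =>
    rw [pvLoopB, List.find?_cons]
    have hb : pvPredB s.toList c =
        decide (2 ≤ PySem.Str.count s (String.ofList [c]) ∧
          PySem.Str.isIn (String.ofList (List.replicate (PySem.Str.count s (String.ofList [c])) c)) s = true) := by
      simp [pvPredB, PySem.Str.count_eq, PySem.Str.isIn_eq]
    split_ifs with h
    · rw [hb, decide_eq_true h]; rfl
    · rw [hb, decide_eq_false h]; exact ih

theorem pvLoopA_eq (l : List Char) (pairs : List (Int × Char)) (d : PySem.Dict Char (List Int))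
    (hinv : ∀ c, (d.contains c = true → d.getD c [] = pvPos c l 0) ∧
                 (d.contains c = false → pvPredA l c = false)) :
    pvLoopA d pairs = ((pairs.map (·.2)).find? (pvPredA l)).map (fun c => String.ofList [c]) := by
  induction pairs generalizing d with
  | nil => simp [pvLoopA]
  | cons p rest ih =>
    obtain ⟨i, c⟩ := p
    rw [pvLoopA, List.map_cons, List.find?_cons]
    by_cases hc : d.contains c = false
    · rw [if_pos hc, (hinv c).2 hc]
      exact ih d hinv
    · rw [if_neg hc]
      have hcT : d.contains c = true := by revert hc; cases d.contains c <;> simp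
      have hps : d.getD c [] = pvPos c l 0 := (hinv c).1 hcT
      have hinv' : pvPredA l c = false →
          ∀ c', ((d.erase c).contains c' = true → (d.erase c).getD c' [] = pvPos c' l 0) ∧
                ((d.erase c).contains c' = false → pvPredA l c' = false) := by
        intro hpf c'
        constructor
        · intro h1
          rw [pvGetD_erase]
          rw [pvContains_erase] at h1
          split_ifs at h1 with he
          rw [if_neg he]; exact (hinv c').1 h1
        · intro h1
          rw [pvContains_erase] at h1
          split_ifs at h1 with he
          · subst he; exact hpf
          · exact (hinv c').2 h1
      simp only [hps]
      by_cases hlen : (pvPos c l 0).length < 2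
      · rw [if_pos hlen]
        have hpf : pvPredA l c = false := by simp [pvPredA, hlen]
        rw [hpf]
        exact ih (d.erase c) (hinv' hpf)
      · rw [if_neg hlen]
        by_cases hcont : pvIsCont (pvPos c l 0)
        · rw [if_pos hcont]
          have hpt : pvPredA l c = true := by simp [pvPredA, hlen, hcont]
          rw [hpt]; rfl
        · rw [if_neg hcont]
          have hpf : pvPredA l c = false := by simp [pvPredA, hlen]; simpa using hcont
          rw [hpf]
          exact ih (d.erase c) (hinv' hpf)

theorem pvPredA_eq_pvPredB (l : List Char) (c : Char) : pvPredA l c = pvPredB l c := by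
  have hcnt := pvPos_length c l 0
  by_cases h2 : 2 ≤ l.count c
  · have hnl : ¬ (pvPos c l 0).length < 2 := by omega
    have hA : pvPredA l c = pvIsCont (pvPos c l 0) := by simp [pvPredA, hnl]
    rw [hA, pvIsCont_noSplit, Bool.eq_iff_iff, pvNoSplit_iff]
    simp only [pvPredB, pvCount_singleton, decide_eq_true_eq]
    rw [PySem.Chars.isIn_iff_infix]
    constructor
    · intro hi; exact ⟨h2, hi⟩
    · intro hi; exact hi.2
  · have hl : (pvPos c l 0).length < 2 := by omega
    have hA : pvPredA l c = false := by simp [pvPredA, hl]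
    have hB : pvPredB l c = false := by
      simp only [pvPredB, pvCount_singleton]
      simp [h2]
    rw [hA, hB]

theorem pv_main (s : String) : (
  let d := (PySem.List.enumerate s.toList).foldl
    (fun d p =>
      let d1 := if d.contains p.2 then d else d.insert p.2 ([] : List Int)
      d1.modify p.2 [] (fun ps => ps ++ [p.1]))
    PySem.Dict.empty
  pvLoopA d (PySem.List.enumerate s.toList)) = pvLoopB s s.toList := by
  have hstep : (fun (d : PySem.Dict Char (List Int)) (p : Int × Char) =>
      let d1 := if d.contains p.2 then d else d.insert p.2 ([] : List Int)
      d1.modify p.2 [] (fun ps => ps ++ [p.1])) = pvStep := rfl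
  show pvLoopA ((PySem.List.enumerate s.toList).foldl _ PySem.Dict.empty) _ = _
  rw [hstep]
  set l := s.toList with hl
  have hinv : ∀ c, ((((PySem.List.enumerate l).foldl pvStep PySem.Dict.empty).contains c = true →
        ((PySem.List.enumerate l).foldl pvStep PySem.Dict.empty).getD c [] = pvPos c l 0)) ∧
      ((((PySem.List.enumerate l).foldl pvStep PySem.Dict.empty).contains c = false → pvPredA l c = false)) := by
    intro c
    constructor
    · intro _
      rw [pvFold_getD]
      simp [pvPos, PySem.Dict.getD_empty]
    · intro hfc
      rw [pvFold_contains, PySem.Dict.contains_empty] at hfc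
      simp only [Bool.false_or, List.any_eq_false] at hfc
      have hnm : c ∉ l := by
        intro hm
        have : c ∈ (PySem.List.enumerate l 0).map (fun x => x.2) := by
          rw [PySem.List.map_snd_enumerate]; exact hm
        obtain ⟨p, hp, hpc⟩ := List.mem_map.1 this
        exact (hfc p hp) (by simp [hpc])
      have : pvPos c l 0 = [] := (pvPos_eq_nil_iff c l 0).2 hnm
      simp [pvPredA, this, pvIsCont]
  rw [pvLoopA_eq l _ _ hinv, pvLoopB_eq, PySem.List.map_snd_enumerate]
  have hpp : pvPredA s.toList = pvPredB s.toList := funext (pvPredA_eq_pvPredB s.toList)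
  rw [← hl, hpp]

-- ===== VERDICT (by name: the statement is the Claim_ definition above) =====
theorem first_stable_character_spec : Claim_equal_first_stable_character := by
  intro s _
  unfold Spec_first_stable_character
  exact pv_main s
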